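-- pv_equiv track=rewrite | github.com/Wulfic/Cicada3301 | LiberPrimus/pages/page_00/analysis/spiral_oldenglish_analysis.py | boustrophedon_read
-- ===== SOURCE A (Python) =====
-- def boustrophedon_read(text, width):
--     """Read alternating left-right, right-left (like plowing a field)"""
--     height = (len(text) + width - 1) // width
--     result = []
--     for row in range(height):
--         start = row * width
--         end = min(start + width, len(text))
--         segment = text[start:end]
--         if row % 2 == 1:  # Odd rows reversed
--             segment = segment[::-1]
--         result.append(segment)
--     return ''.join(result)
-- ===== SOURCE B (Python) =====
-- def boustrophedon_read(text, width):
--     """Read alternating left-right, right-left (like plowing a field)"""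
--     n = len(text)
--
--     def src(j):
--         row, col = divmod(j, width)
--         if row % 2 == 0:
--             return j
--         seg_len = min(width, n - row * width)
--         return row * width + (seg_len - 1 - col)
--
--     return ''.join(text[src(j)] for j in range(n))
-- ===== Notes on version B (the rewrite author's own statement) =====
-- stated objective: alternative
-- what changed: Replaces the row loop that slices the text into width-sized rows and reverses the odd ones by a single per-character pass that computes, for each output position, its source index under the boustrophedon permutation and gathers directly (no slicing, no row list).
-- outside the precondition, e.g. on boustrophedon_read('ab', -1): A returns '', B returns 'ab'
import Mathlib
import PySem

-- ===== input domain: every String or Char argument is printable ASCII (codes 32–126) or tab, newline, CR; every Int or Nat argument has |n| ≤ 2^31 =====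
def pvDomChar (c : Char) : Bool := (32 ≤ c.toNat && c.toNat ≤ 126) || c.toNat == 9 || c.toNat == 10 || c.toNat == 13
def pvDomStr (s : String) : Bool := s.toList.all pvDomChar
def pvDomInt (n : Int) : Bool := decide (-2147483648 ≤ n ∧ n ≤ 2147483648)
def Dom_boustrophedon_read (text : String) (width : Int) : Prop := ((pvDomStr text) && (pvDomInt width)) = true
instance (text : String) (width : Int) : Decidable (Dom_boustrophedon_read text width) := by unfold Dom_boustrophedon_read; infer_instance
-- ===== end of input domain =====

-- B replaces A's row-slicing loop (reverse every odd row) by a single per-output-index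
-- gather through the boustrophedon index permutation (alternative decomposition, same cost).


-- ===== PORT A =====
def boustrophedon_read (text : String) (width : Int) : String :=
  let cs := text.toList
  let height := PySem.Int.floordiv ((cs.length : Int) + width - 1) width
  let result : List (List Char) :=
    (PySem.List.pyRange 0 height 1).foldl (fun result row =>
      let start := row * width
      let stop := min (start + width) ((cs.length : Int))
      let segment := PySem.List.slice cs (some start) (some stop)
      let segment := if PySem.Int.mod row 2 == 1
                     then (PySem.List.slice? segment none none (-1)).getD []  -- segment[::-1]
                     else segment
      result ++ [segment]) []
  String.ofList result.flatten

-- ===== PORT B =====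
def boustrophedon_read_alt (text : String) (width : Int) : String :=
  let cs := text.toList
  let n : Int := (cs.length : Int)
  String.ofList <| (PySem.List.pyRange 0 n 1).map (fun j =>
    let row := PySem.Int.floordiv j width
    let col := PySem.Int.mod j width
    let src := if PySem.Int.mod row 2 == 0 then j
               else row * width + (min width (n - row * width) - 1 - col)
    -- text[src(j)]: for every admitted input src is in range, so the default is never used
    PySem.List.pyGetD cs src ' ')

-- ===== PRECONDITION & SPEC =====
-- width = 0 makes A raise ZeroDivisionError; negative widths are excluded as outside the
-- function's natural domain: A's empty-string result there is an artefact of its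
-- ceiling-division height computation going nonpositive.
def Pre_boustrophedon_read (text : String) (width : Int) : Prop := 1 ≤ width
instance (text : String) (width : Int) : Decidable (Pre_boustrophedon_read text width) := by unfold Pre_boustrophedon_read; infer_instance
def pvWitness_boustrophedon_read : String × Int := ("abcdefg", 3)
def Spec_boustrophedon_read (text : String) (width : Int) (out : String) : Prop := out = boustrophedon_read_alt text width
instance (text : String) (width : Int) (out : String) : Decidable (Spec_boustrophedon_read text width out) := by unfold Spec_boustrophedon_read; infer_instance

-- ===== CLAIM (what is proved, stated in full; the proofs are below) =====
def Claim_equal_boustrophedon_read : Prop := ∀ (text : String) (width : Int), Dom_boustrophedon_read text width → Pre_boustrophedon_read text width → Spec_boustrophedon_read text width (boustrophedon_read text width)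

-- ===== LEMMAS AND PROOFS =====

def bous (W : Nat) : Nat → Bool → List Char → List Char
  | 0, _, _ => []
  | k+1, flip, l =>
    if l.isEmpty then []
    else (if flip then (l.take W).reverse else l.take W) ++ bous W k (!flip) (l.drop W)

theorem bous_nil (W k : Nat) (flip : Bool) : bous W k flip [] = [] := by
  cases k <;> simp [bous]

theorem ceil_le {N W r : Nat} (hW : 0 < W) (h : N ≤ r * W) : (N + W - 1) / W ≤ r := by
  rw [Nat.div_le_iff_le_mul_add_pred hW, mul_comm]
  omega

theorem lt_ceil {N W r : Nat} (hW : 0 < W) (h : r * W < N) : r < (N + W - 1) / W := by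
  have := (Nat.le_div_iff_mul_le hW (x := r+1) (y := N + W - 1)).mpr (by rw [add_mul]; omega)
  omega

theorem cov_ceil {N W : Nat} (hW : 0 < W) : N ≤ (N + W - 1) / W * W := by
  have h1 := Nat.div_add_mod (N + W - 1) W
  have h2 : (N + W - 1) % W < W := Nat.mod_lt _ hW
  rw [mul_comm]
  omega

theorem lemA (cs : List Char) (W : Nat) (hW : 0 < W) :
    ∀ (k r : Nat), cs.length ≤ (r + k) * W →
    ((PySem.List.pyRange (r:Int) (((cs.length + W - 1)/W : Nat):Int) 1).map
       (fun row =>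
         if PySem.Int.mod row 2 == 1
         then (PySem.List.slice? (PySem.List.slice cs (some (row * (W:Int))) (some (min (row * (W:Int) + (W:Int)) ((cs.length:Int))))) none none (-1)).getD []
         else PySem.List.slice cs (some (row * (W:Int))) (some (min (row * (W:Int) + (W:Int)) ((cs.length:Int)))))).flatten
    = bous W k (r % 2 == 1) (cs.drop (r*W)) := by
  intro k
  induction k with
  | zero =>
    intro r h
    rw [PySem.List.pyRange_one_eq_nil (by exact_mod_cast ceil_le hW (by simpa using h))]
    simp [bous]
  | succ k ih =>
    intro r h
    by_cases hNr : cs.length ≤ r * W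
    · rw [PySem.List.pyRange_one_eq_nil (by exact_mod_cast ceil_le hW hNr)]
      simp [bous, List.drop_eq_nil_of_le hNr]
    · have hNr' : r * W < cs.length := by omega
      have hrH : (r:Int) < (((cs.length + W - 1)/W : Nat):Int) := by exact_mod_cast lt_ceil hW hNr'
      rw [PySem.List.pyRange_one_cons hrH]
      have hc1 : (r:Int) + 1 = ((r+1 : Nat):Int) := by push_cast; ring
      rw [hc1, List.map_cons, List.flatten_cons]
      have hslice : PySem.List.slice cs (some ((r:Int) * (W:Int))) (some (min ((r:Int)*(W:Int) + (W:Int)) ((cs.length:Int)))) = (cs.drop (r*W)).take W := by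
        have h2 : min ((r:Int)*(W:Int) + (W:Int)) ((cs.length:Int)) = ((min (r*W + W) cs.length : Nat):Int) := by
          rw [Nat.cast_min]; push_cast; ring_nf
        have h1 : (r:Int)*(W:Int) = ((r*W : Nat):Int) := by push_cast; ring
        rw [h2, h1, PySem.List.slice_natCast]
        have h3 : min (r*W + W) cs.length - r*W = min W (cs.length - r*W) := by omega
        rw [h3]
        have h4 : min W (cs.length - r*W) = min W ((cs.drop (r*W)).length) := by simp
        rw [h4, ← List.take_eq_take_min]
      have hne : (cs.drop (r*W)).isEmpty = false := by simp only [List.isEmpty_eq_false_iff, ne_eq, List.drop_eq_nil_iff]; omega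
      have ihr := ih (r+1) (by rw [show (r+1)+k = r+(k+1) by omega]; exact h)
      have hdd : (cs.drop (r*W)).drop W = cs.drop ((r+1)*W) := by
        rw [List.drop_drop]; congr 1; ring
      rw [ihr]
      rcases Nat.mod_two_eq_zero_or_one r with hp|hp
      · have hp1 : (r+1) % 2 = 1 := by omega
        have hmi : ¬((r:Int) % 2 = 1) := by omega
        simp [bous, hne, hp, hp1, hmi, hslice, hdd]
      · have hp1 : (r+1) % 2 = 0 := by omega
        have hmi : ¬((2:Int) ∣ (r:Int)) := by omega
        simp [bous, hne, hp, hp1, hmi, hslice, hdd, PySem.List.slice?_none_none_neg_one]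
theorem gather_even (cs : List Char) (s L : Nat) (h : s + L ≤ cs.length) :
    (PySem.List.pyRange (s:Int) ((s+L : Nat):Int) 1).map (fun j => PySem.List.pyGetD cs j ' ')
      = (cs.drop s).take L := by
  apply List.ext_getElem
  · simp [PySem.List.length_pyRange_one]; omega
  · intro i h1 h2
    have hi : i < L := by simpa [PySem.List.length_pyRange_one] using h1
    simp only [List.getElem_map, PySem.List.getElem_pyRange_one]
    have hcast : (s:Int) + (i:Int) = ((s+i : Nat) : Int) := by push_cast; ring
    rw [hcast, PySem.List.pyGetD_natCast]
    rw [List.getElem_take, List.getElem_drop]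
    rw [List.getD_eq_getElem]

theorem gather_odd (cs : List Char) (s L : Nat) (h : s + L ≤ cs.length) :
    (PySem.List.pyRange (s:Int) ((s+L : Nat):Int) 1).map
        (fun j => PySem.List.pyGetD cs ((s:Int) + ((L:Int) - 1 - (j - (s:Int)))) ' ')
      = ((cs.drop s).take L).reverse := by
  apply List.ext_getElem
  · simp [PySem.List.length_pyRange_one]; omega
  · intro i h1 h2
    have hi : i < L := by simpa [PySem.List.length_pyRange_one] using h1
    have hlen : (List.take L (List.drop s cs)).length = L := by simp; omega
    simp only [List.getElem_map, PySem.List.getElem_pyRange_one]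
    have hcast : (s:Int) + ((L:Int) - 1 - ((s:Int) + (i:Int) - (s:Int))) = ((s + (L - 1 - i) : Nat) : Int) := by
      push_cast; omega
    rw [hcast, PySem.List.pyGetD_natCast]
    rw [List.getElem_reverse, List.getElem_take, List.getElem_drop]
    rw [List.getD_eq_getElem]
    · congr 1
      rw [hlen]
    · omega

theorem lemB (cs : List Char) (W : Nat) (hW : 0 < W) :
    ∀ (k r : Nat), cs.length ≤ (r + k) * W →
    (PySem.List.pyRange ((r*W : Nat):Int) ((cs.length : Nat):Int) 1).map
      (fun j =>
        PySem.List.pyGetD cs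
          (if PySem.Int.mod (PySem.Int.floordiv j (W:Int)) 2 == 0 then j
           else PySem.Int.floordiv j (W:Int) * (W:Int) +
                (min (W:Int) ((cs.length:Int) - PySem.Int.floordiv j (W:Int) * (W:Int)) - 1 -
                  PySem.Int.mod j (W:Int))) ' ')
    = bous W k (r % 2 == 1) (cs.drop (r*W)) := by
  intro k
  induction k with
  | zero =>
    intro r h
    rw [PySem.List.pyRange_one_eq_nil (by exact_mod_cast (by simpa using h : cs.length ≤ r * W))]
    simp [bous]
  | succ k ih =>
    intro r h
    by_cases hNr : cs.length ≤ r * W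
    · rw [PySem.List.pyRange_one_eq_nil (by exact_mod_cast hNr)]
      simp [bous, List.drop_eq_nil_of_le hNr]
    · have hNr' : r * W < cs.length := by omega
      have hLW : min W (cs.length - r*W) ≤ W := Nat.min_le_left _ _
      have hL1 : 1 ≤ min W (cs.length - r*W) := by omega
      rw [PySem.List.pyRange_one_append ((r*W : Nat):Int) ((r*W + min W (cs.length - r*W) : Nat):Int)
            ((cs.length : Nat):Int) (by exact_mod_cast Nat.le_add_right _ _) (by exact_mod_cast (by omega : r*W + min W (cs.length - r*W) ≤ cs.length))]
      rw [List.map_append]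
      -- per-element simplification on the head range
      have hfd : ∀ j : Int, ((r*W : Nat):Int) ≤ j → j < ((r*W + min W (cs.length - r*W) : Nat):Int) →
          PySem.Int.floordiv j (W:Int) = (r:Int) := by
        intro j hj1 hj2
        rw [PySem.Int.floordiv_eq_iff_of_pos (by exact_mod_cast hW)]
        have e1 : (r:Int) * (W:Int) = ((r*W : Nat):Int) := by push_cast; ring
        have e2 : ((r:Int) + 1) * (W:Int) = ((r*W + W : Nat):Int) := by push_cast; ring
        rw [e1, e2]
        omega
      have hmd : ∀ j : Int, ((r*W : Nat):Int) ≤ j → j < ((r*W + min W (cs.length - r*W) : Nat):Int) →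
          PySem.Int.mod j (W:Int) = j - ((r*W : Nat):Int) := by
        intro j hj1 hj2
        have h0 := PySem.Int.floordiv_mul_add_mod j (W:Int)
        rw [hfd j hj1 hj2] at h0
        have e1 : (r:Int) * (W:Int) = ((r*W : Nat):Int) := by push_cast; ring
        omega
      have hcast : min ((W:Nat):Int) ((cs.length:Int) - ((r*W : Nat):Int)) = ((min W (cs.length - r*W) : Nat):Int) := by
        rw [Nat.cast_min]
        congr 1
        omega
      -- tail equals the recursive call
      have htail : (PySem.List.pyRange ((r*W + min W (cs.length - r*W) : Nat):Int) ((cs.length : Nat):Int) 1).map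
          (fun j =>
            PySem.List.pyGetD cs
              (if PySem.Int.mod (PySem.Int.floordiv j (W:Int)) 2 == 0 then j
               else PySem.Int.floordiv j (W:Int) * (W:Int) +
                    (min (W:Int) ((cs.length:Int) - PySem.Int.floordiv j (W:Int) * (W:Int)) - 1 -
                      PySem.Int.mod j (W:Int))) ' ')
          = bous W k ((r+1) % 2 == 1) (cs.drop ((r+1)*W)) := by
        by_cases hbig : (r+1)*W ≤ cs.length
        · have he : r*W + min W (cs.length - r*W) = (r+1)*W := by
            have : (r+1)*W = r*W + W := by ring
            omega
          rw [he]
          exact ih (r+1) (by rw [show (r+1)+k = r+(k+1) by omega]; exact h)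
        · have hmul : (r+1)*W = r*W + W := by ring
          have h1 : r*W + min W (cs.length - r*W) = cs.length := by omega
          have h2 : cs.drop ((r+1)*W) = [] := List.drop_eq_nil_of_le (by omega)
          rw [h1, h2, PySem.List.pyRange_one_eq_nil (le_refl _), bous_nil]
          simp
      rw [htail]
      -- head chunk
      have htakeW : (cs.drop (r*W)).take (min W (cs.length - r*W)) = (cs.drop (r*W)).take W := by
        have h4 : min W (cs.length - r*W) = min W ((cs.drop (r*W)).length) := by simp
        rw [h4, ← List.take_eq_take_min]
      have hne : (cs.drop (r*W)).isEmpty = false := by simp; omega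
      rcases Nat.mod_two_eq_zero_or_one r with hp|hp
      · have hdvd : ((2:Int) ∣ (r:Int)) := by omega
        have hcong : ∀ j ∈ PySem.List.pyRange ((r*W : Nat):Int) ((r*W + min W (cs.length - r*W) : Nat):Int) 1,
            (PySem.List.pyGetD cs
              (if PySem.Int.mod (PySem.Int.floordiv j (W:Int)) 2 == 0 then j
               else PySem.Int.floordiv j (W:Int) * (W:Int) +
                    (min (W:Int) ((cs.length:Int) - PySem.Int.floordiv j (W:Int) * (W:Int)) - 1 -
                      PySem.Int.mod j (W:Int))) ' ')
            = PySem.List.pyGetD cs j ' ' := by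
          intro j hj
          rw [PySem.List.mem_pyRange_one] at hj
          rw [hfd j hj.1 hj.2]
          simp [hdvd]
        rw [List.map_congr_left hcong, gather_even cs (r*W) (min W (cs.length - r*W)) (by omega)]
        rw [htakeW]
        have hp1 : (r+1) % 2 = 1 := by omega
        have hmul : (r+1)*W = r*W + W := by ring
        simp [bous, hne, hp, hp1, hmul]
      · have hndvd : ¬((2:Int) ∣ (r:Int)) := by omega
        have hcong : ∀ j ∈ PySem.List.pyRange ((r*W : Nat):Int) ((r*W + min W (cs.length - r*W) : Nat):Int) 1,
            (PySem.List.pyGetD cs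
              (if PySem.Int.mod (PySem.Int.floordiv j (W:Int)) 2 == 0 then j
               else PySem.Int.floordiv j (W:Int) * (W:Int) +
                    (min (W:Int) ((cs.length:Int) - PySem.Int.floordiv j (W:Int) * (W:Int)) - 1 -
                      PySem.Int.mod j (W:Int))) ' ')
            = PySem.List.pyGetD cs (((r*W : Nat):Int) + (((min W (cs.length - r*W) : Nat):Int) - 1 - (j - ((r*W : Nat):Int)))) ' ' := by
          intro j hj
          rw [PySem.List.mem_pyRange_one] at hj
          rw [hfd j hj.1 hj.2, hmd j hj.1 hj.2]
          have e1 : (r:Int) * (W:Int) = ((r*W : Nat):Int) := by push_cast; ring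
          rw [e1, hcast]
          simp [hndvd]
        rw [List.map_congr_left hcong, gather_odd cs (r*W) (min W (cs.length - r*W)) (by omega)]
        rw [htakeW]
        have hp1 : (r+1) % 2 = 0 := by omega
        have hmul : (r+1)*W = r*W + W := by ring
        simp [bous, hne, hp, hp1, hmul]

-- ===== VERDICT (by name: the statement is the Claim_ definition above) =====
theorem boustrophedon_read_spec : Claim_equal_boustrophedon_read := by
  intro text width hdom hpre
  unfold Pre_boustrophedon_read at hpre
  obtain ⟨W, rfl⟩ : ∃ W : Nat, width = (W:Int) :=
    ⟨width.toNat, (Int.toNat_of_nonneg (by omega)).symm⟩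
  have hW : 0 < W := by exact_mod_cast lt_of_lt_of_le Int.zero_lt_one hpre
  unfold Spec_boustrophedon_read boustrophedon_read boustrophedon_read_alt
  simp only []
  congr 1
  rw [PySem.List.foldl_append_singleton_eq_map]
  have hh : PySem.Int.floordiv ((text.toList.length:Int) + (W:Int) - 1) (W:Int)
      = (((text.toList.length + W - 1)/W : Nat):Int) := by
    have e : (text.toList.length:Int) + (W:Int) - 1 = ((text.toList.length + W - 1 : Nat):Int) := by
      omega
    rw [e, PySem.Int.floordiv_natCast]
  rw [hh]
  have hA := lemA text.toList W hW ((text.toList.length + W - 1)/W) 0 (by simpa using cov_ceil hW)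
  have hB := lemB text.toList W hW ((text.toList.length + W - 1)/W) 0 (by simpa using cov_ceil hW)
  simp only [Nat.zero_mul, Nat.cast_zero, List.drop_zero] at hA hB
  rw [List.nil_append, hA, hB]
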